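-- pv_equiv track=rewrite | github.com/collinsakenga/codewars_solutions | 6 kyu/6 kyu_Remember.py | remember
-- ===== SOURCE A (Python) =====
-- def remember(str):
--     dict = {}
--     res = []
--     for i in str:
--         dict[i] = dict.get(i, 0)+1
--         if dict[i] >= 2 and i not in res:
--             res.append(i)
--     return res
-- ===== SOURCE B (Python) =====
-- def remember(str):
--     return [c for i, c in enumerate(str) if str[:i].count(c) == 1]
-- ===== Notes on version B (the rewrite author's own statement) =====
-- stated objective: alternative
-- what changed: B drops A's counting dict and growing membership list entirely: it is a stateless staged filter that keeps each character whose preceding prefix contains it exactly once (its second occurrence), trading A's single stateful pass for a quadratic prefix-count comprehension.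
import Mathlib
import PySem

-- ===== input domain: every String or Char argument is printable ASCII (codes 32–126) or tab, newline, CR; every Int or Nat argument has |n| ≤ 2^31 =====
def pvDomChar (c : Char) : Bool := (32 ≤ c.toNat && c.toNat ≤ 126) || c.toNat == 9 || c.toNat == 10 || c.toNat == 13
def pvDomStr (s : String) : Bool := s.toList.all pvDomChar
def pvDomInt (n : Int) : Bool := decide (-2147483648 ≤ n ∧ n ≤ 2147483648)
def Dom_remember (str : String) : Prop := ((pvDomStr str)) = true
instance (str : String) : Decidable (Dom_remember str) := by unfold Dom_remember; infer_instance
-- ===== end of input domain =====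

-- B replaces A's counting-dict-plus-membership-list loop by a stateless staged filter:
-- keep each character whose prefix before it contains it exactly once; objective: alternative.

-- ===== PORT A =====
def rememberStepA (st : PySem.Dict String Int × List String) (c : Char) :
    PySem.Dict String Int × List String :=
  let i := String.ofList [c]
  let d := st.1.insert i (st.1.getD i 0 + 1)
  let res := if d.getD i 0 ≥ 2 ∧ i ∉ st.2 then st.2 ++ [i] else st.2
  (d, res)

def remember (str : String) : List String :=
  (str.toList.foldl rememberStepA (PySem.Dict.empty, [])).2

-- ===== PORT B =====
-- [c for i, c in enumerate(str) if str[:i].count(c) == 1]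
def remember_alt (str : String) : List String :=
  ((PySem.List.enumerate str.toList 0).filter
      (fun p => PySem.Str.count (PySem.Str.slice str none (some p.1)) (String.ofList [p.2]) == 1)).map
    (fun p => String.ofList [p.2])

-- ===== PRECONDITION & SPEC =====
def Spec_remember (str : String) (out : List String) : Prop := out = remember_alt str
instance (str : String) (out : List String) : Decidable (Spec_remember str out) := by unfold Spec_remember; infer_instance

-- ===== CLAIM (what is proved, stated in full; the proofs are below) =====
def Claim_equal_remember : Prop := ∀ (str : String), Dom_remember str → Spec_remember str (remember str)

-- ===== LEMMAS AND PROOFS =====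

-- Python's substring count for a one-character pattern is element count.
theorem countGo_single (c : Char) : ∀ (fuel : Nat) (xs : List Char) (acc : Nat), xs.length ≤ fuel →
    PySem.Chars.count.go [c] fuel xs acc = acc + xs.count c := by
  intro fuel
  induction fuel with
  | zero =>
    intro xs acc h
    have hx : xs = [] := List.eq_nil_of_length_eq_zero (Nat.le_zero.mp h)
    subst hx
    simp [PySem.Chars.count.go]
  | succ n ih =>
    intro xs acc h
    cases xs with
    | nil => simp [PySem.Chars.count.go]
    | cons hd t =>
      simp only [PySem.Chars.count.go, List.isPrefixOf, List.length_cons] at *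
      by_cases hc : c = hd
      · subst hc
        simp only [BEq.rfl, Bool.true_and, if_pos, List.length_nil, List.drop_zero,
          List.drop_succ_cons]
        rw [ih t (acc + 1) (by omega), List.count_cons_self]
        omega
      · have hb : (c == hd) = false := by simpa using hc
        simp only [hb, Bool.false_and, Bool.false_eq_true, not_false_iff, if_neg,
          List.drop_succ_cons]
        rw [ih t acc (by omega)]
        simp only [List.count_cons]
        have : (hd == c) = false := by simp; exact fun h => hc h.symm
        simp [this]

theorem chars_count_single (c : Char) (xs : List Char) :
    PySem.Chars.count xs [c] = xs.count c := by
  simp [PySem.Chars.count, countGo_single c xs.length xs 0 le_rfl]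

theorem ofList_single_inj {a b : Char} (h : String.ofList [a] = String.ofList [b]) : a = b := by
  have := congrArg String.toList h
  simpa using this

-- Main loop correspondence: A's fold over the remaining characters, started from the
-- counter and result of a processed prefix, produces exactly B's prefix-count filter
-- of the remaining characters (with take-indices into the full string).
theorem remember_loop (full : List Char) : ∀ (rest pre : List Char)
    (hf : full = pre ++ rest) (d : PySem.Dict String Int) (res : List String)
    (hd : ∀ c : Char, d.getD (String.ofList [c]) 0 = pre.count c)
    (hres : ∀ c : Char, String.ofList [c] ∈ res ↔ 2 ≤ pre.count c),
    (rest.foldl rememberStepA (d, res)).2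
      = res ++ (((PySem.List.enumerate rest (pre.length : Int)).filter
          (fun p => decide ((full.take p.1.toNat).count p.2 = 1))).map
            (fun p => String.ofList [p.2])) := by
  intro rest
  induction rest with
  | nil => intro pre _ d res _ _; simp [PySem.List.enumerate_nil]
  | cons c t ih =>
    intro pre hf d res hd hres
    rw [PySem.List.enumerate_cons, List.foldl_cons, List.filter_cons]
    have htake : full.take ((pre.length : Int)).toNat = pre := by
      rw [hf]; simp
    have hstep : rememberStepA (d, res) c
        = (d.insert (String.ofList [c]) (d.getD (String.ofList [c]) 0 + 1),
            if pre.count c = 1 then res ++ [String.ofList [c]] else res) := by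
      simp only [rememberStepA, PySem.Dict.getD_insert_self, hd]
      congr 1
      by_cases h1 : pre.count c = 1
      · rw [if_pos h1, if_pos ⟨by omega, fun hm => by have := (hres c).mp hm; omega⟩]
      · rw [if_neg h1]
        by_cases h2 : 2 ≤ pre.count c
        · rw [if_neg]; rintro ⟨_, hnm⟩; exact hnm ((hres c).mpr h2)
        · rw [if_neg]; rintro ⟨hge, _⟩; omega
    rw [hstep]
    have hih := ih (pre ++ [c]) (by simpa using hf)
      (d.insert (String.ofList [c]) (d.getD (String.ofList [c]) 0 + 1))
      (if pre.count c = 1 then res ++ [String.ofList [c]] else res)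
      (by
        intro c'
        by_cases hc : c' = c
        · subst hc
          rw [PySem.Dict.getD_insert_self, hd]
          simp [List.count_append]
        · rw [PySem.Dict.getD_insert_of_ne _ _ _ (fun h => hc (ofList_single_inj h)), hd]
          have hcc : List.count c' [c] = 0 := List.count_eq_zero.mpr (by simp [hc])
          simp [List.count_append, hcc])
      (by
        intro c'
        by_cases hc : c' = c
        · subst hc
          by_cases h1 : pre.count c' = 1
          · simp [h1, List.count_append]
          · rw [if_neg h1, hres, List.count_append]
            simp only [List.count_cons_self, List.count_nil]
            omega
        · have hne : String.ofList [c'] ≠ String.ofList [c] :=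
            fun h => hc (ofList_single_inj h)
          have hcc : List.count c' [c] = 0 := List.count_eq_zero.mpr (by simp [hc])
          rw [List.count_append, hcc, Nat.add_zero]
          by_cases h1 : pre.count c = 1
          · simp only [h1, ite_true, List.mem_append, List.mem_singleton, hne,
              or_false, hres]
          · simp only [h1, ite_false, hres])
    rw [hih]
    have hlen : (((pre ++ [c]).length : Nat) : Int) = (pre.length : Int) + 1 := by simp
    rw [hlen, htake]
    by_cases h1 : pre.count c = 1
    · rw [if_pos h1, if_pos (show decide (List.count c pre = 1) = true by simp [h1]),
        List.map_cons, List.append_assoc, List.singleton_append]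
    · rw [if_neg h1, if_neg (show ¬ decide (List.count c pre = 1) = true by simp [h1])]

-- ===== VERDICT (by name: the statement is the Claim_ definition above) =====
theorem remember_spec : Claim_equal_remember := by
  intro str _
  unfold Spec_remember remember remember_alt
  rw [remember_loop str.toList str.toList [] rfl PySem.Dict.empty []
    (by intro c; simp [PySem.Dict.getD, PySem.Dict.get?, PySem.Dict.empty])
    (by intro c; simp), List.nil_append]
  congr 1
  apply List.filter_congr
  intro p hp
  rcases (PySem.List.mem_enumerate_iff _ _ _).mp hp with ⟨k, hk, rfl⟩
  simp [pysem, chars_count_single, PySem.List.slice_to_natCast, beq_eq_decide]
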